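-- pv_equiv track=rewrite | github.com/ypollak2/context-engineering-handbook | benchmarks/python/benchmarks/instruction_adherence.py | _check_uppercase_terms
-- ===== SOURCE A (Python) =====
-- def _check_uppercase_terms(response: str) -> bool:
--     """Check that at least some technical terms are uppercased.
--
--     This is a soft check - we look for common tech terms and verify at least
--     one appears in uppercase if any tech terms are present.
--     """
--     tech_terms = [
--         "python", "javascript", "typescript", "java", "http", "https",
--         "tcp", "udp", "dns", "sql", "rest", "api", "json", "html", "css",
--     ]
--     lower = response.lower()
--     found_terms = [t for t in tech_terms if t in lower]
--     if not found_terms: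
--         return True  # No tech terms to check
--     return any(t.upper() in response for t in found_terms)
-- ===== SOURCE B (Python) =====
-- def _check_uppercase_terms(response: str) -> bool:
--     """Position-anchored single scan: walk the response index by index; if any
--     tech term matches fully uppercased at some index, pass immediately;
--     otherwise record whether some tech term occurs (case-insensitively) at any
--     index, and pass iff none did."""
--     tech_terms = [
--         "python", "javascript", "typescript", "java", "http", "https",
--         "tcp", "udp", "dns", "sql", "rest", "api", "json", "html", "css",
--     ]
--     uppers = [t.upper() for t in tech_terms]
--     lower = response.lower()
--     present = False
--     for i in range(len(response)):
--         if any(response.startswith(u, i) for u in uppers):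
--             return True
--         if not present and any(lower.startswith(t, i) for t in tech_terms):
--             present = True
--     return not present
-- ===== Notes on version B (the rewrite author's own statement) =====
-- stated objective: alternative
-- what changed: Replaced A's per-term substring containment ('t in lower', materialize found_terms, then any over upper occurrences) by a single position-anchored scan over the response: at each index it tests anchored startswith matches, returning True at the first uppercased occurrence and tracking a presence flag otherwise.
import Mathlib
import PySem

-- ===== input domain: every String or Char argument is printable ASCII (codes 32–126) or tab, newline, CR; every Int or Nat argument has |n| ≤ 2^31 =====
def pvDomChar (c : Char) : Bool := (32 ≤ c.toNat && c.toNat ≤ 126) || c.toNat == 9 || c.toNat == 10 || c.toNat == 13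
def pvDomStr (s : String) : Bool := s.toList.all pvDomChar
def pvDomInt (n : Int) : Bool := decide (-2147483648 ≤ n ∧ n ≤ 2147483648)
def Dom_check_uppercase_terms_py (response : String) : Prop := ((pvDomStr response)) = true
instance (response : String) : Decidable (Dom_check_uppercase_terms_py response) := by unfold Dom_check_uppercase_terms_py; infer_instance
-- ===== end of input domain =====

-- B replaces A's per-term substring containment with one position-anchored scan
-- of the response (early exit on an uppercased match, presence flag otherwise);
-- objective: alternative algorithm, same asymptotic cost.

def pvTechTerms : List String :=
  ["python", "javascript", "typescript", "java", "http", "https",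
   "tcp", "udp", "dns", "sql", "rest", "api", "json", "html", "css"]

-- ===== PORT A =====
def check_uppercase_terms_py (response : String) : Bool :=
  let lower := PySem.Str.lower response
  let found_terms := pvTechTerms.filter (fun t => PySem.Str.isIn t lower)
  if found_terms = [] then true
  else found_terms.any (fun t => PySem.Str.isIn (PySem.Str.upper t) response)

-- ===== PORT B =====
-- uppers = [t.upper() for t in tech_terms]
def pvUppers : List (List Char) := pvTechTerms.map (fun t => PySem.Chars.upper t.toList)

-- the scan loop: one step per index i of the response (r is the suffix from i,
-- l the suffix of the lowercased response from i); response.startswith(u, i)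
-- is ported exactly as u.isPrefixOf (suffix from i)
def pvAltGo : List Char → List Char → Bool → Bool
  | [], _, present => !present
  | c :: rs, l, present =>
    if pvUppers.any (fun u => u.isPrefixOf (c :: rs)) then true
    else pvAltGo rs l.tail (present || pvTechTerms.any (fun t => t.toList.isPrefixOf l))

def check_uppercase_terms_py_alt (response : String) : Bool :=
  let lower := PySem.Str.lower response
  pvAltGo response.toList lower.toList false

-- ===== PRECONDITION & SPEC =====
def Spec_check_uppercase_terms_py (response : String) (out : Bool) : Prop := out = check_uppercase_terms_py_alt response
instance (response : String) (out : Bool) : Decidable (Spec_check_uppercase_terms_py response out) := by unfold Spec_check_uppercase_terms_py; infer_instance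

-- ===== CLAIM (what is proved, stated in full; the proofs are below) =====
def Claim_equal_check_uppercase_terms_py : Prop := ∀ (response : String), Dom_check_uppercase_terms_py response → Spec_check_uppercase_terms_py response (check_uppercase_terms_py response)

-- ===== LEMMAS AND PROOFS =====

-- anchored-occurrence scan of a single pattern
def pvOccurs (p : List Char) : List Char → Bool
  | [] => false
  | c :: rs => p.isPrefixOf (c :: rs) || pvOccurs p rs

-- like pvOccurs p l, but the recursion is driven by r (as in pvAltGo)
def pvOccursL (p : List Char) : List Char → List Char → Bool
  | [], _ => false
  | _ :: rs, l => p.isPrefixOf l || pvOccursL p rs l.tail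

theorem pvOccurs_iff_infix (p : List Char) (hp : p ≠ []) :
    ∀ r : List Char, pvOccurs p r = true ↔ p <:+: r := by
  intro r
  induction r with
  | nil => simp [pvOccurs, List.infix_nil, hp]
  | cons c rs ih =>
      simp [pvOccurs, ih, List.infix_cons_iff, List.isPrefixOf_iff_prefix]

theorem pvOccursL_eq_pvOccurs (p : List Char) :
    ∀ (r l : List Char), r.length = l.length → pvOccursL p r l = pvOccurs p l := by
  intro r
  induction r with
  | nil =>
      intro l h
      cases l with
      | nil => rfl
      | cons c ls => simp at h
  | cons c rs ih =>
      intro l h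
      cases l with
      | nil => simp at h
      | cons d ls =>
          simp only [pvOccursL, pvOccurs, List.tail_cons]
          rw [ih ls (by simpa using h)]

theorem pv_any_or {α : Type} (l : List α) (f g : α → Bool) :
    l.any (fun x => f x || g x) = (l.any f || l.any g) := by
  induction l with
  | nil => rfl
  | cons a t ih =>
      simp [List.any_cons, ih, Bool.or_assoc, Bool.or_left_comm]

theorem pv_any_congr {α : Type} (l : List α) (f g : α → Bool)
    (h : ∀ x ∈ l, f x = g x) : l.any f = l.any g := by
  induction l with
  | nil => rfl
  | cons a t ih =>
      simp only [List.any_cons]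
      rw [h a (List.mem_cons_self), ih (fun x hx => h x (List.mem_cons_of_mem a hx))]

theorem pvAltGo_eq (r : List Char) : ∀ (l : List Char) (present : Bool),
    pvAltGo r l present =
      (pvUppers.any (fun u => pvOccurs u r)
        || !(present || pvTechTerms.any (fun t => pvOccursL t.toList r l))) := by
  induction r with
  | nil =>
      intro l present
      simp only [pvAltGo, pvOccurs, pvOccursL]
      cases present <;> rfl
  | cons c rs ih =>
      intro l present
      simp only [pvAltGo]
      by_cases h : pvUppers.any (fun u => u.isPrefixOf (c :: rs)) = true
      · rw [if_pos h]
        have : pvUppers.any (fun u => pvOccurs u (c :: rs)) = true := by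
          simp only [pvOccurs, pv_any_or]
          rw [h]
          rfl
        rw [this]
        rfl
      · rw [if_neg h]
        rw [ih]
        have hU : pvUppers.any (fun u => pvOccurs u (c :: rs))
            = pvUppers.any (fun u => pvOccurs u rs) := by
          simp only [pvOccurs, pv_any_or]
          rw [Bool.eq_false_iff.mpr h, Bool.false_or]
        have hL : pvTechTerms.any (fun t => pvOccursL t.toList (c :: rs) l)
            = (pvTechTerms.any (fun t => t.toList.isPrefixOf l)
               || pvTechTerms.any (fun t => pvOccursL t.toList rs l.tail)) := by
          simp only [pvOccursL, pv_any_or]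
        rw [hU, hL]
        congr 1
        congr 1
        rw [Bool.or_assoc]

-- B as a boolean formula over whole-string containment
theorem pvAlt_closed (response : String) :
    check_uppercase_terms_py_alt response =
      (pvTechTerms.any (fun t => PySem.Str.isIn (PySem.Str.upper t) response)
        || !(pvTechTerms.any (fun t => PySem.Str.isIn t (PySem.Str.lower response)))) := by
  unfold check_uppercase_terms_py_alt
  simp only []
  rw [pvAltGo_eq]
  have hlen : response.toList.length = (PySem.Str.lower response).toList.length := by
    rw [PySem.Str.toList_lower]
    unfold PySem.Chars.lower
    simp
  congr 1
  · -- upper side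
    unfold pvUppers
    rw [List.any_map]
    apply pv_any_congr
    intro t ht
    have hne : PySem.Chars.upper t.toList ≠ [] := by fin_cases ht <;> decide
    have h1 := pvOccurs_iff_infix (PySem.Chars.upper t.toList) hne response.toList
    have h2 := PySem.Str.isIn_iff_infix (PySem.Str.upper t) response
    rw [PySem.Str.toList_upper] at h2
    simp only [Function.comp]
    rcases Bool.eq_false_or_eq_true (pvOccurs (PySem.Chars.upper t.toList) response.toList) with hb | hb
    · rw [hb]; symm; rw [h2]; exact h1.mp hb
    · rw [hb]; symm; rw [Bool.eq_false_iff]; intro hc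
      exact absurd (h1.mpr (h2.mp hc)) (by rw [hb]; decide)
  · -- lower side
    congr 1
    apply pv_any_congr
    intro t ht
    have hne : t.toList ≠ [] := by fin_cases ht <;> decide
    rw [pvOccursL_eq_pvOccurs t.toList response.toList (PySem.Str.lower response).toList hlen]
    have h1 := pvOccurs_iff_infix t.toList hne (PySem.Str.lower response).toList
    have h2 := PySem.Str.isIn_iff_infix t (PySem.Str.lower response)
    rcases Bool.eq_false_or_eq_true (pvOccurs t.toList (PySem.Str.lower response).toList) with hb | hb
    · rw [hb]; symm; rw [h2]; exact h1.mp hb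
    · rw [hb]; symm; rw [Bool.eq_false_iff]; intro hc
      exact absurd (h1.mpr (h2.mp hc)) (by rw [hb]; decide)

-- an uppercased occurrence of a tech term implies the term occurs in the lowercased response
theorem pv_upper_implies_lower (response t : String)
    (hmap : (t.toList.map PySem.Chars.upperChar).map PySem.Chars.lowerChar = t.toList)
    (h : PySem.Str.isIn (PySem.Str.upper t) response = true) :
    PySem.Str.isIn t (PySem.Str.lower response) = true := by
  rw [PySem.Str.isIn_iff_infix] at h ⊢
  rw [PySem.Str.toList_upper] at h
  rw [PySem.Str.toList_lower]
  unfold PySem.Chars.upper at h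
  unfold PySem.Chars.lower
  have := h.map PySem.Chars.lowerChar
  rwa [hmap] at this

theorem pv_terms_ok (response : String) :
    ∀ t ∈ pvTechTerms, PySem.Str.isIn (PySem.Str.upper t) response = true →
      PySem.Str.isIn t (PySem.Str.lower response) = true := by
  intro t ht h
  refine pv_upper_implies_lower response t ?_ h
  fin_cases ht <;> decide

theorem check_uppercase_terms_py_spec : Claim_equal_check_uppercase_terms_py := by
  intro response _
  unfold Spec_check_uppercase_terms_py
  rw [pvAlt_closed]
  unfold check_uppercase_terms_py
  have hkey := pv_terms_ok response
  simp only []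
  set p : String → Bool := fun t => PySem.Str.isIn t (PySem.Str.lower response) with hp
  set q : String → Bool := fun t => PySem.Str.isIn (PySem.Str.upper t) response with hq
  by_cases hnil : pvTechTerms.filter p = []
  · rw [if_pos hnil]
    have hanyp : pvTechTerms.any p = false := by
      rw [List.any_eq_false]
      intro t ht
      have := List.filter_eq_nil_iff.mp hnil t ht
      simpa using this
    have hanyq : pvTechTerms.any q = false := by
      rw [List.any_eq_false]
      intro t ht hqt
      have := hkey t ht hqt
      exact absurd this (by have := List.filter_eq_nil_iff.mp hnil t ht; simpa [hp] using this)
    rw [hanyq, hanyp]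
    rfl
  · rw [if_neg hnil]
    have hanyp : pvTechTerms.any p = true := by
      by_contra hc
      apply hnil
      rw [Bool.not_eq_true, List.any_eq_false] at hc
      rw [List.filter_eq_nil_iff]
      intro t ht
      simpa using hc t ht
    rw [hanyp]
    simp only [Bool.not_true, Bool.or_false]
    by_cases hfa : (pvTechTerms.filter p).any q = true
    · rw [hfa]
      symm
      rw [List.any_eq_true] at hfa ⊢
      obtain ⟨t, ht, hqt⟩ := hfa
      exact ⟨t, (List.mem_filter.mp ht).1, hqt⟩
    · rw [Bool.eq_false_iff.mpr hfa]
      symm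
      rw [Bool.not_eq_true, List.any_eq_false] at hfa
      rw [List.any_eq_false]
      intro t ht hqt
      exact hfa t (List.mem_filter.mpr ⟨ht, hkey t ht hqt⟩) hqt
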